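-- pv_equiv track=rewrite | github.com/OneTrickPony82/Bridge-Tools | bridgetools.py | analyze_bidding
-- ===== SOURCE A (Python) =====
-- def analyze_bidding(bidding, dealer):
--     """Returns a tuple: (final contract, declarer, doubled);
--     doubled is True or False"""
--     if len(bidding) == 4 and len(set(bidding)) == 1:
--         return ("passout", dealer, False)
--     contract = "passout"
--     try:
--         for x in reversed(bidding):
--             if len(x) == 2:
--                 contract = x
--                 break;
--         trumps = contract[1]
--         indexfinal = bidding.index(contract) % 2
--         doubled = False
--         for x in bidding[bidding.index(contract):]:
--             if x.lower() == "d":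
--                 doubled = True
--
--         declarer = dealer
--         for x in bidding:
--             if len(x) == 2 and x[1] == trumps and (bidding.index(x) % 2) == indexfinal:
--                 declarer = (dealer + bidding.index(x)) % 4
--                 break;
--
--         return (contract, declarer, doubled)
--     except:
--         return (None, None, None)
-- ===== SOURCE B (Python) =====
-- def analyze_bidding(bidding, dealer):
--     """Returns a tuple: (final contract, declarer, doubled);
--     doubled is True or False"""
--     if len(bidding) == 4 and len(set(bidding)) == 1:
--         return ("passout", dealer, False)
--     first = {}        # value -> first index: reversed pass, the last (earliest) write wins
--     contract = None   # first length-2 bid seen in reverse = the final contract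
--     dmax = -1         # largest index holding a double
--     for i, x in reversed(list(enumerate(bidding))):
--         first[x] = i
--         if contract is None and len(x) == 2:
--             contract = x
--         if dmax < 0 and x.lower() == "d":
--             dmax = i
--     if contract is None:
--         contract = "passout"
--     fi = first.get(contract)
--     if fi is None:
--         return (None, None, None)
--     trumps = contract[1]
--     cands = [i for x, i in first.items()
--              if len(x) == 2 and x[1] == trumps and i % 2 == fi % 2]
--     declarer = (dealer + min(cands)) % 4 if cands else dealer
--     return (contract, declarer, dmax >= fi)
-- ===== Notes on version B (the rewrite author's own statement) =====
-- stated objective: alternative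
-- what changed: Replaces A's three staged forward scans with repeated bidding.index rescans and a break-search for the declarer by ONE reversed pass (overwrite dict whose last write is the first occurrence, contract = first length-2 bid met in reverse, dmax = largest double index) followed by doubled = (dmax >= fi) and declarer = min over the filtered dict items instead of a first-match break loop.
import Mathlib
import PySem

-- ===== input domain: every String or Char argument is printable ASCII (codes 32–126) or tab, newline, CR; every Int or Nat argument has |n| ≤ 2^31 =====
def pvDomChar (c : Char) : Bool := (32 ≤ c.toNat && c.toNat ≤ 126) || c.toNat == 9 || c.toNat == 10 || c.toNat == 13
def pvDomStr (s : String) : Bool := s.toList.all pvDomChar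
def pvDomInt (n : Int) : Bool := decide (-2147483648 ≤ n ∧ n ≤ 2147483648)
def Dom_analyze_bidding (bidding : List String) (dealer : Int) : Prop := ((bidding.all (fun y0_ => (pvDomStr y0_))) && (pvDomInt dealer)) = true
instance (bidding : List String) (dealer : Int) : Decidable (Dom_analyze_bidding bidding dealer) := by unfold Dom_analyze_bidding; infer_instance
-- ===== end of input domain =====

-- B replaces A's staged forward scans (with repeated .index rescans and a break-search)
-- by one REVERSED pass plus a min over filtered dict items; the return value is proved identical.

-- ===== PORT A =====
-- 'for x in reversed(bidding): if len(x)==2: contract = x; break' starting from "passout"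
def pvRevFind2 : List String → String
  | [] => "passout"
  | x :: rest => if x.length == 2 then x else pvRevFind2 rest

-- the declarer-search loop; none = a raising bidding.index(x) call
def pvDeclLoop (bidding : List String) (dealer : Int) (trumps : Char) (indexfinal : Nat) :
    List String → Option Int
  | [] => some dealer
  | x :: rest =>
    if x.length == 2 && decide (PySem.Str.pyGet? x 1 = some trumps) then
      match PySem.List.index? bidding x with
      | none => none
      | some j =>
        if j % 2 == indexfinal then some (PySem.Int.mod (dealer + (j : Int)) 4)
        else pvDeclLoop bidding dealer trumps indexfinal rest
    else pvDeclLoop bidding dealer trumps indexfinal rest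

def analyze_bidding (bidding : List String) (dealer : Int) : Option String × Option Int × Option Bool :=
  if bidding.length == 4 && (PySem.Set.ofList bidding).length == 1 then
    (some "passout", some dealer, some false)
  else
    let contract := pvRevFind2 bidding.reverse
    match PySem.Str.pyGet? contract 1 with
    | none => (none, none, none)
    | some trumps =>
      match PySem.List.index? bidding contract with
      | none => (none, none, none)
      | some i =>
        let indexfinal := i % 2
        let doubled := (PySem.List.slice bidding (some (i : Int)) none).foldl
            (fun d x => if PySem.Str.lower x == "d" then true else d) false
        match pvDeclLoop bidding dealer trumps indexfinal bidding with
        | none => (none, none, none)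
        | some declarer => (some contract, some declarer, some doubled)

-- ===== PORT B =====
-- one step of B's single REVERSED pass over reversed(list(enumerate(bidding)))
def pvRevStep (st : PySem.Dict String Int × Option String × Int) (p : Int × String) :
    PySem.Dict String Int × Option String × Int :=
  let (first, contract, dmax) := st
  let (i, x) := p
  let first := first.insert x i
  let contract := if contract.isNone && (x.length == 2) then some x else contract
  let dmax := if decide (dmax < 0) && (PySem.Str.lower x == "d") then i else dmax
  (first, contract, dmax)

def analyze_bidding_alt (bidding : List String) (dealer : Int) : Option String × Option Int × Option Bool :=
  if bidding.length == 4 && (PySem.Set.ofList bidding).length == 1 then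
    (some "passout", some dealer, some false)
  else
    let st := (PySem.List.enumerate bidding 0).reverse.foldl pvRevStep (PySem.Dict.empty, none, -1)
    let contract := st.2.1.getD "passout"
    match st.1.get? contract with
    | none => (none, none, none)
    | some fi =>
      -- contract[1]: total-guard only, contract always has length ≥ 2 here
      match PySem.Str.pyGet? contract 1 with
      | none => (none, none, none)
      | some trumps =>
        let cands := (st.1.items.filter (fun q =>
            q.1.length == 2 && decide (PySem.Str.pyGet? q.1 1 = some trumps) &&
              decide (PySem.Int.mod q.2 2 = PySem.Int.mod fi 2))).map (·.2)
        let declarer := match cands.min? with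
          | none => dealer
          | some m => PySem.Int.mod (dealer + m) 4
        (some contract, some declarer, some (decide (fi ≤ st.2.2)))

-- ===== PRECONDITION & SPEC =====
def Spec_analyze_bidding (bidding : List String) (dealer : Int) (out : Option String × Option Int × Option Bool) : Prop := out = analyze_bidding_alt bidding dealer
instance (bidding : List String) (dealer : Int) (out : Option String × Option Int × Option Bool) : Decidable (Spec_analyze_bidding bidding dealer out) := by unfold Spec_analyze_bidding; infer_instance

-- ===== CLAIM (what is proved, stated in full; the proofs are below) =====
def Claim_equal_analyze_bidding : Prop := ∀ (bidding : List String) (dealer : Int), Dom_analyze_bidding bidding dealer → Spec_analyze_bidding bidding dealer (analyze_bidding bidding dealer)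

-- ===== LEMMAS AND PROOFS =====

-- reference descriptions of the quantities both programs compute
def sFirst (l : List String) (v : String) : Option Int :=
  (PySem.List.index? l v).map (fun n => (n : Int))

def sF2 (l : List String) : List (Int × String) :=
  (PySem.List.enumerate l 0).filter
    (fun p => p.2.length == 2 && (sFirst l p.2 == some p.1))

def sL (l : List String) : Option String := l.reverse.find? (fun x => x.length == 2)

def sD (l : List String) : List Int :=
  ((PySem.List.enumerate l 0).filter (fun p => PySem.Str.lower p.2 == "d")).map (·.1)

def sDmax (l : List String) : Option Int :=
  ((PySem.List.enumerate l 0).reverse.find? (fun p => PySem.Str.lower p.2 == "d")).map (·.1)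

def pvRevFold (l : List String) : PySem.Dict String Int × Option String × Int :=
  (PySem.List.enumerate l 0).reverse.foldl pvRevStep (PySem.Dict.empty, none, -1)

-- A's break-search over the first-occurrence list, used as a proof-side middle point
def pvPick (dealer : Int) (t : Option Char) (m : Int) : List (Int × String) → Int
  | [] => dealer
  | (i, x) :: rest =>
    if decide (PySem.Str.pyGet? x 1 = t) && decide (PySem.Int.mod i 2 = m) then
      PySem.Int.mod (dealer + i) 4
    else pvPick dealer t m rest

theorem index?_append_single (l : List String) (x v : String) :
    PySem.List.index? (l ++ [x]) v =
      match PySem.List.index? l v with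
      | some j => some j
      | none => if v = x then some l.length else none := by
  by_cases hv : v ∈ l
  · rw [PySem.List.index?_append_of_mem [x] hv]
    rcases Option.isSome_iff_exists.mp ((PySem.List.index?_isSome_iff l v).mpr hv) with ⟨j, hj⟩
    rw [hj]
  · have h0 : PySem.List.index? l v = none := (PySem.List.index?_eq_none_iff l v).mpr hv
    rw [h0]
    by_cases hx : v = x
    · subst hx
      rw [PySem.List.index?_append_singleton_self l v hv]
      simp
    · have hnm : v ∉ l ++ [x] := by simp [hv, hx]
      rw [(PySem.List.index?_eq_none_iff _ v).mpr hnm]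
      simp [hx]

theorem sFirst_append (l : List String) (x v : String) :
    sFirst (l ++ [x]) v =
      match sFirst l v with
      | some j => some j
      | none => if v = x then some (l.length : Int) else none := by
  unfold sFirst
  rw [index?_append_single]
  cases h : PySem.List.index? l v with
  | some j => simp
  | none => by_cases hx : v = x <;> simp [hx]

theorem sL_append (l : List String) (x : String) :
    sL (l ++ [x]) = if x.length == 2 then some x else sL l := by
  unfold sL
  rw [List.reverse_append]
  by_cases h2 : (x.length == 2) = true <;> simp [h2]

theorem sD_append (l : List String) (x : String) :
    sD (l ++ [x]) = sD l ++ (if (PySem.Str.lower x == "d") = true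
      then [(0 + (l.length : Int))] else []) := by
  unfold sD
  rw [PySem.List.enumerate_append, List.filter_append, List.map_append]
  by_cases hd : (PySem.Str.lower x == "d") = true <;>
    simp [PySem.List.enumerate_cons, PySem.List.enumerate_nil, hd]

theorem sDmax_append (l : List String) (x : String) :
    sDmax (l ++ [x]) = if (PySem.Str.lower x == "d") = true
      then some (0 + (l.length : Int)) else sDmax l := by
  unfold sDmax
  rw [PySem.List.enumerate_append, List.reverse_append]
  by_cases hd : (PySem.Str.lower x == "d") = true <;>
    simp [PySem.List.enumerate_cons, PySem.List.enumerate_nil, hd]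

theorem sD_lt (l : List String) : ∀ j ∈ sD l, j < (l.length : Int) := by
  intro j hj
  unfold sD at hj
  rcases List.mem_map.mp hj with ⟨p, hp, rfl⟩
  rcases (PySem.List.mem_enumerate_iff l 0 p).mp (List.mem_of_mem_filter hp) with ⟨k, hk, rfl⟩
  simp only [zero_add]
  exact_mod_cast hk

-- the single reversed pass, characterized for an arbitrary starting state
theorem revfold_general (l : List String) (d : PySem.Dict String Int) (c : Option String) (m : Int) :
    (∀ v, ((PySem.List.enumerate l 0).reverse.foldl pvRevStep (d, c, m)).1.get? v =
        match sFirst l v with | some j => some j | none => d.get? v) ∧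
    ((PySem.List.enumerate l 0).reverse.foldl pvRevStep (d, c, m)).2.1 =
        (if c.isSome then c else sL l) ∧
    ((PySem.List.enumerate l 0).reverse.foldl pvRevStep (d, c, m)).2.2 =
        (if 0 ≤ m then m else (sDmax l).getD m) := by
  induction l using List.reverseRecOn generalizing d c m with
  | nil =>
    refine ⟨fun v => ?_, ?_, ?_⟩
    · simp [PySem.List.enumerate_nil, sFirst, PySem.List.index?]
    · cases c <;> simp [PySem.List.enumerate_nil, sL]
    · by_cases hm : 0 ≤ m <;> simp [PySem.List.enumerate_nil, sDmax, hm]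
  | append_singleton l x ih =>
    have hrw : (PySem.List.enumerate (l ++ [x]) 0).reverse.foldl pvRevStep (d, c, m) =
        (PySem.List.enumerate l 0).reverse.foldl pvRevStep (pvRevStep (d, c, m) (0 + (l.length : Int), x)) := by
      rw [PySem.List.enumerate_append]
      simp [PySem.List.enumerate_cons, PySem.List.enumerate_nil]
    set d' := d.insert x (0 + (l.length : Int)) with hd'
    have hstep : pvRevStep (d, c, m) (0 + (l.length : Int), x) =
        (d', (if c.isNone && (x.length == 2) then some x else c),
          (if decide (m < 0) && (PySem.Str.lower x == "d") then 0 + (l.length : Int) else m)) := rfl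
    rw [hrw, hstep]
    obtain ⟨ih1, ih2, ih3⟩ := ih d' (if c.isNone && (x.length == 2) then some x else c)
      (if decide (m < 0) && (PySem.Str.lower x == "d") then 0 + (l.length : Int) else m)
    refine ⟨fun v => ?_, ?_, ?_⟩
    · rw [ih1 v, sFirst_append]
      cases hf : sFirst l v with
      | some j => rfl
      | none =>
        rw [hd', PySem.Dict.get?_insert]
        by_cases hv : v = x <;> simp [hv]
    · rw [ih2, sL_append]
      cases c with
      | some s => simp
      | none =>
        by_cases h2 : (x.length == 2) = true <;> simp [h2]
    · rw [ih3, sDmax_append]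
      by_cases hm : 0 ≤ m
      · have : decide (m < 0) = false := by simp; omega
        simp [this, hm]
      · have hm' : decide (m < 0) = true := by simp; omega
        by_cases hd : (PySem.Str.lower x == "d") = true
        · simp [hm', hd, hm]
        · simp only [Bool.not_eq_true] at hd
          simp [hm', hd, hm]

-- the dict component of the pass is a plain insert loop (keyed by the bid string)
theorem revfold_dict (L : List (Int × String)) (d : PySem.Dict String Int)
    (c : Option String) (m : Int) :
    (L.foldl pvRevStep (d, c, m)).1 = L.foldl (fun d p => d.insert p.2 p.1) d := by
  induction L generalizing d c m with
  | nil => rfl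
  | cons p rest ih =>
    obtain ⟨i, x⟩ := p
    simp only [List.foldl_cons]
    exact ih _ _ _

theorem get?_revfold (l : List String) (v : String) :
    (pvRevFold l).1.get? v = sFirst l v := by
  have h := (revfold_general l PySem.Dict.empty none (-1)).1 v
  unfold pvRevFold
  rw [h]
  cases hf : sFirst l v with
  | some j => rfl
  | none => simp [PySem.Dict.get?_empty]

theorem keys_revfold (l : List String) :
    (pvRevFold l).1.keys = PySem.Set.ofList l.reverse := by
  unfold pvRevFold
  rw [revfold_dict]
  rw [PySem.Dict.keys_foldl_insert_key ((PySem.List.enumerate l 0).reverse) (·.2)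
    (fun d p => p.1) PySem.Dict.empty]
  rw [PySem.Dict.keys_empty, PySem.Set.update_nil_left]
  congr 1
  rw [List.map_reverse, PySem.List.map_snd_enumerate]

theorem nodup_keys_revfold (l : List String) : (pvRevFold l).1.keys.Nodup := by
  rw [keys_revfold]
  exact PySem.Set.nodup_ofList _

theorem mem_keys_revfold (l : List String) (v : String) :
    v ∈ (pvRevFold l).1.keys ↔ v ∈ l := by
  rw [keys_revfold, PySem.Set.mem_ofList, List.mem_reverse]

theorem pairwise_sF2 (l : List String) : (sF2 l).Pairwise (fun p q => p.1 < q.1) :=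
  (PySem.List.pairwise_lt_enumerate l 0).filter _

-- B's min over the filtered dict items = head of the filtered first-occurrence list
theorem cands_min_bridge (l : List String) (trumps : Char) (mI : Int) :
    (((pvRevFold l).1.items.filter (fun q =>
        q.1.length == 2 && decide (PySem.Str.pyGet? q.1 1 = some trumps) &&
          decide (PySem.Int.mod q.2 2 = mI))).map (·.2)).min?
      = (((sF2 l).filter (fun p => decide (PySem.Str.pyGet? p.2 1 = some trumps) &&
          decide (PySem.Int.mod p.1 2 = mI))).head?).map (·.1) := by
  set F := (sF2 l).filter (fun p => decide (PySem.Str.pyGet? p.2 1 = some trumps) &&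
      decide (PySem.Int.mod p.1 2 = mI)) with hF
  set cands := ((pvRevFold l).1.items.filter (fun q =>
      q.1.length == 2 && decide (PySem.Str.pyGet? q.1 1 = some trumps) &&
        decide (PySem.Int.mod q.2 2 = mI))).map (·.2) with hcands
  have hitems : (pvRevFold l).1.items =
      (pvRevFold l).1.keys.map (fun k => (k, (pvRevFold l).1.getD k 0)) :=
    PySem.Dict.items_eq_map_keys _ (nodup_keys_revfold l) 0
  have hgetD : ∀ v, (pvRevFold l).1.getD v 0 = (sFirst l v).getD 0 := by
    intro v
    rw [PySem.Dict.getD_eq_get?_getD, get?_revfold]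
  have hmem : ∀ j, j ∈ cands ↔ ∃ p ∈ F, p.1 = j := by
    intro j
    rw [hcands]
    constructor
    · intro hj
      rcases List.mem_map.mp hj with ⟨q, hq, rfl⟩
      have hqf := List.of_mem_filter hq
      have hqm := List.mem_of_mem_filter hq
      rw [hitems] at hqm
      rcases List.mem_map.mp hqm with ⟨k, hk, rfl⟩
      have hkl : k ∈ l := (mem_keys_revfold l k).mp hk
      rcases Option.isSome_iff_exists.mp ((PySem.List.index?_isSome_iff l k).mpr hkl) with ⟨n, hn⟩
      have hfk : sFirst l k = some ((n : Nat) : Int) := by unfold sFirst; rw [hn]; rfl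
      have hgd : (pvRevFold l).1.getD k 0 = ((n : Nat) : Int) := by rw [hgetD, hfk]; rfl
      rcases PySem.List.getElem_of_index?_eq_some hn with ⟨hnlt, hbn, -⟩
      simp only [Bool.and_eq_true, beq_iff_eq, decide_eq_true_eq] at hqf
      obtain ⟨⟨h2, hc⟩, hm⟩ := hqf
      refine ⟨(((n : Nat) : Int), k), ?_, by rw [hgd]⟩
      rw [hF]
      apply List.mem_filter.mpr
      constructor
      · unfold sF2
        apply List.mem_filter.mpr
        refine ⟨(PySem.List.mem_enumerate_iff l 0 _).mpr ⟨n, hnlt, by rw [hbn]; simp⟩, ?_⟩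
        simp only [Bool.and_eq_true, beq_iff_eq]
        exact ⟨h2, by rw [hfk]⟩
      · simp only [Bool.and_eq_true, decide_eq_true_eq]
        rw [hgd] at hm
        exact ⟨hc, hm⟩
    · rintro ⟨p, hp, rfl⟩
      rw [hF] at hp
      have hpf := List.of_mem_filter hp
      have hps := List.mem_of_mem_filter hp
      unfold sF2 at hps
      have hpe := List.mem_of_mem_filter hps
      have hpc := List.of_mem_filter hps
      simp only [Bool.and_eq_true, beq_iff_eq] at hpc
      obtain ⟨h2, hfp⟩ := hpc
      have hpl : p.2 ∈ l := by
        rcases (PySem.List.mem_enumerate_iff l 0 p).mp hpe with ⟨k, hk, rfl⟩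
        exact List.getElem_mem hk
      apply List.mem_map.mpr
      refine ⟨(p.2, (pvRevFold l).1.getD p.2 0), ?_, by simp [hgetD, hfp]⟩
      apply List.mem_filter.mpr
      constructor
      · rw [hitems]
        exact List.mem_map.mpr ⟨p.2, (mem_keys_revfold l p.2).mpr hpl, rfl⟩
      · simp only [Bool.and_eq_true, beq_iff_eq, decide_eq_true_eq] at hpf ⊢
        exact ⟨⟨h2, hpf.1⟩, by rw [hgetD, hfp]; exact hpf.2⟩
  cases hFc : F with
  | nil =>
    have : cands = [] := by
      apply List.eq_nil_iff_forall_not_mem.mpr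
      intro j hj
      rcases (hmem j).mp hj with ⟨p, hp, -⟩
      rw [hFc] at hp
      cases hp
    rw [this]
    rfl
  | cons p t =>
    have hpw : (p :: t).Pairwise (fun a b : Int × String => a.1 < b.1) := by
      rw [← hFc, hF]
      exact (pairwise_sF2 l).filter _
    have hp1 : p.1 ∈ cands := (hmem p.1).mpr ⟨p, by rw [hFc]; simp, rfl⟩
    have hle : ∀ b ∈ cands, p.1 ≤ b := by
      intro b hb
      rcases (hmem b).mp hb with ⟨q, hq, rfl⟩
      rw [hFc] at hq
      rcases List.mem_cons.mp hq with rfl | hq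
      · exact le_refl _
      · exact le_of_lt ((List.pairwise_cons.mp hpw).1 q hq)
    rw [List.min?_eq_some_iff.mpr ⟨hp1, hle⟩]
    rfl

-- doubled: 'some double at index ≥ fi' = 'fi ≤ largest double index'
theorem any_sD_eq (l : List String) (fi : Int) (hfi : 0 ≤ fi) :
    (sD l).any (fun p => decide (fi ≤ p)) = decide (fi ≤ (sDmax l).getD (-1)) := by
  induction l using List.reverseRecOn with
  | nil =>
    have h1 : sD ([] : List String) = [] := rfl
    have h2 : sDmax ([] : List String) = none := rfl
    rw [h1, h2]
    simp only [List.any_nil, Option.getD_none]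
    have : ¬ (fi ≤ -1) := by omega
    simp [this]
  | append_singleton l x ih =>
    rw [sD_append, sDmax_append]
    by_cases hd : (PySem.Str.lower x == "d") = true
    · rw [if_pos hd, if_pos hd]
      simp only [List.any_append, List.any_cons, List.any_nil, Bool.or_false, Option.getD_some]
      by_cases hle : (fi ≤ 0 + (l.length : Int))
      · simp only [decide_eq_true hle, Bool.or_true]
        exact (decide_eq_true hle).symm
      · have hnone : (sD l).any (fun p => decide (fi ≤ p)) = false := by
          rw [List.any_eq_false]
          intro j hj
          have := sD_lt l j hj
          simp only [decide_eq_true_eq]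
          omega
        simp [hnone]
    · simp only [Bool.not_eq_true] at hd
      rw [hd]
      simp only [Bool.false_eq_true, if_false, List.append_nil]
      exact ih

theorem revFind2_eq (r : List String) :
    pvRevFind2 r = (r.find? (fun x => x.length == 2)).getD "passout" := by
  induction r with
  | nil => rfl
  | cons x rest ih =>
    by_cases h : x.length == 2 <;> simp [pvRevFind2, List.find?, h, ih]

-- the declarer-search condition of A, as a predicate on the bid string
def Qb (bidding : List String) (trumps : Char) (m : Nat) (x : String) : Bool :=
  x.length == 2 && decide (PySem.Str.pyGet? x 1 = some trumps) &&
    decide (∃ j, PySem.List.index? bidding x = some j ∧ j % 2 = m)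

theorem declLoop_eq_find (bidding : List String) (dealer : Int) (trumps : Char) (m : Nat)
    (l : List String) (hl : ∀ x ∈ l, x ∈ bidding) :
    pvDeclLoop bidding dealer trumps m l =
      some (match l.find? (Qb bidding trumps m) with
            | some x => PySem.Int.mod (dealer + (((PySem.List.index? bidding x).getD 0 : Nat) : Int)) 4
            | none => dealer) := by
  induction l with
  | nil => rfl
  | cons x rest ih =>
    have hx : x ∈ bidding := hl x (by simp)
    have hrest : ∀ y ∈ rest, y ∈ bidding := fun y hy => hl y (by simp [hy])
    rcases Option.isSome_iff_exists.mp ((PySem.List.index?_isSome_iff bidding x).mpr hx) with ⟨j, hj⟩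
    by_cases h1 : (x.length == 2 && decide (PySem.Str.pyGet? x 1 = some trumps)) = true
    · by_cases h2 : j % 2 = m
      · have hq : Qb bidding trumps m x = true := by
          have h1' := Bool.and_eq_true_iff.mp h1
          simp only [Qb, Bool.and_eq_true, h1'.1, h1'.2, true_and, decide_eq_true_eq]
          exact ⟨j, hj, h2⟩
        simp only [pvDeclLoop, h1, if_true, hj, List.find?, hq]
        simp [h2]
      · have hq : Qb bidding trumps m x = false := by
          simp only [Qb]
          simp only [Bool.and_eq_false_iff]
          right
          simp only [decide_eq_false_iff_not]
          rintro ⟨j', hj', hm⟩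
          rw [hj] at hj'; cases hj'; exact h2 hm
        simp only [pvDeclLoop, h1, if_true, hj, List.find?, hq]
        simp only [beq_iff_eq, h2, if_false]
        exact ih hrest
    · have hq : Qb bidding trumps m x = false := by
        simp only [Qb]
        rw [Bool.and_eq_false_iff]
        left
        exact Bool.eq_false_iff.mpr (fun hc => h1 hc)
      simp only [pvDeclLoop, h1, List.find?, hq]
      exact ih hrest

theorem pick_eq_find (dealer : Int) (t : Option Char) (m : Int) (fl : List (Int × String)) :
    pvPick dealer t m fl =
      match fl.find? (fun p => decide (PySem.Str.pyGet? p.2 1 = t) && decide (PySem.Int.mod p.1 2 = m)) with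
      | some p => PySem.Int.mod (dealer + p.1) 4
      | none => dealer := by
  induction fl with
  | nil => rfl
  | cons p rest ih =>
    obtain ⟨i, x⟩ := p
    by_cases h : (decide (PySem.Str.pyGet? x 1 = t) && decide (PySem.Int.mod i 2 = m)) = true
    · simp only [pvPick, h, if_true, List.find?]
    · rw [Bool.not_eq_true] at h
      simp only [pvPick, h, List.find?]
      simpa using ih

theorem decl_bridge (bidding : List String) (dealer : Int) (trumps : Char) (m : Nat) :
    pvDeclLoop bidding dealer trumps m bidding =
      some (pvPick dealer (some trumps) ((m : Nat) : Int) (sF2 bidding)) := by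
  have hmod : ∀ k : Nat, PySem.Int.mod ((k : Nat) : Int) 2 = (((k % 2 : Nat)) : Int) := by
    intro k; exact_mod_cast PySem.Int.mod_natCast k 2
  have hder : ∀ (v : String) (k : Nat), sFirst bidding v = some ((k : Nat) : Int) →
      PySem.List.index? bidding v = some k := by
    intro v k h
    unfold sFirst at h
    cases hi : PySem.List.index? bidding v with
    | none => rw [hi] at h; cases h
    | some n =>
      rw [hi] at h
      simp at h
      have : n = k := by exact_mod_cast h
      simp [this]
  have hPQ : ∀ (k : Nat) (hk : k < bidding.length),
      bidding[k].length = 2 → sFirst bidding bidding[k] = some ((k : Nat) : Int) →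
      PySem.Str.pyGet? bidding[k] 1 = some trumps → k % 2 = m →
      Qb bidding trumps m bidding[k] = true := by
    intro k hk h2 hf hc hm
    simp only [Qb, Bool.and_eq_true, beq_iff_eq, decide_eq_true_eq]
    exact ⟨⟨h2, hc⟩, k, hder _ _ hf, hm⟩
  rw [declLoop_eq_find bidding dealer trumps m bidding (fun x hx => hx), pick_eq_find]
  unfold sF2
  rw [List.find?_filter]
  cases hfind : bidding.find? (Qb bidding trumps m) with
  | none =>
    have hall := List.find?_eq_none.mp hfind
    have : (PySem.List.enumerate bidding 0).find?
        (fun a => decide ((a.2.length == 2 && (sFirst bidding a.2 == some a.1)) = true ∧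
          (decide (PySem.Str.pyGet? a.2 1 = some trumps) &&
            decide (PySem.Int.mod a.1 2 = ((m : Nat) : Int))) = true)) = none := by
      rw [List.find?_eq_none]
      intro p hp
      rcases (PySem.List.mem_enumerate_iff bidding 0 p).mp hp with ⟨k, hk, rfl⟩
      simp only [zero_add]
      intro hcon
      rw [decide_eq_true_eq] at hcon
      obtain ⟨hX, hY⟩ := hcon
      rw [Bool.and_eq_true, beq_iff_eq] at hX
      rw [Bool.and_eq_true] at hY
      have hc := of_decide_eq_true hY.1
      have hm' := of_decide_eq_true hY.2
      have hf : sFirst bidding bidding[k] = some ((k : Nat) : Int) := by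
        have := hX.2; simpa using this
      rw [hmod k] at hm'
      have hm2 : k % 2 = m := by exact_mod_cast hm'
      have h2 : bidding[k].length = 2 := by simpa using hX.1
      exact hall bidding[k] (List.getElem_mem hk) (hPQ k hk h2 hf hc hm2)
    rw [this]
  | some x =>
    rcases List.find?_eq_some_iff_getElem.mp hfind with ⟨hqx, POS, hPOS, hxe, hfirstq⟩
    have hq := hqx
    simp only [Qb, Bool.and_eq_true, beq_iff_eq, decide_eq_true_eq] at hq
    obtain ⟨⟨hx2, hxc⟩, j, hj, hjm⟩ := hq
    rcases PySem.List.getElem_of_index?_eq_some hj with ⟨hjlt, hbj, hjfirst⟩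
    have hPOSj : j = POS := by
      have h1 : ¬ j < POS := by
        intro hlt
        have hh := hfirstq j hlt
        rw [hbj] at hh
        simp [hqx] at hh
      have h2 : ¬ POS < j := fun hlt => hjfirst POS hlt hxe
      omega
    subst hPOSj
    have hEnum : (PySem.List.enumerate bidding 0).find?
        (fun a => decide ((a.2.length == 2 && (sFirst bidding a.2 == some a.1)) = true ∧
          (decide (PySem.Str.pyGet? a.2 1 = some trumps) &&
            decide (PySem.Int.mod a.1 2 = ((m : Nat) : Int))) = true)) =
          some (((j : Nat) : Int), x) := by
      rw [List.find?_eq_some_iff_getElem]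
      refine ⟨?_, j, by rw [PySem.List.length_enumerate]; exact hjlt, ?_, ?_⟩
      · have hfj : sFirst bidding x = some ((j : Nat) : Int) := by
          unfold sFirst; rw [hj]; rfl
        simp only [decide_eq_true_eq, Bool.and_eq_true, beq_iff_eq, decide_eq_true_eq]
        refine ⟨⟨hx2, hfj⟩, hxc, ?_⟩
        rw [hmod j, hjm]
      · rw [PySem.List.getElem_enumerate bidding 0 j
            (by rw [PySem.List.length_enumerate]; exact hjlt)]
        rw [hbj]
        simp
      · intro k hkj
        have hk : k < bidding.length := by omega
        rw [PySem.List.getElem_enumerate bidding 0 k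
            (by rw [PySem.List.length_enumerate]; omega)]
        simp only [zero_add, Bool.not_eq_eq_eq_not, Bool.not_true, decide_eq_false_iff_not]
        intro hcon
        obtain ⟨hX, hY⟩ := hcon
        rw [Bool.and_eq_true, beq_iff_eq] at hX
        rw [Bool.and_eq_true] at hY
        have hc := of_decide_eq_true hY.1
        have hm' := of_decide_eq_true hY.2
        have hf : sFirst bidding bidding[k] = some ((k : Nat) : Int) := by
          have := hX.2; simpa using this
        rw [hmod k] at hm'
        have hm2 : k % 2 = m := by exact_mod_cast hm'
        have h2 : bidding[k].length = 2 := by simpa using hX.1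
        have hqk := hPQ k hk h2 hf hc hm2
        have hh := hfirstq k hkj
        rw [hqk] at hh
        cases hh
    rw [hEnum]
    have hj' := hj
    rw [PySem.List.index?_eq_idxOf?] at hj'
    simp [hj']

theorem doubled_eq (bidding : List String) (i : Nat) :
    (PySem.List.slice bidding (some ((i : Nat) : Int)) none).foldl
      (fun d x => if PySem.Str.lower x == "d" then true else d) false =
    (sD bidding).any (fun p => decide (((i : Nat) : Int) ≤ p)) := by
  rw [PySem.List.slice_from_natCast, PySem.List.foldl_if_true_eq]
  simp only [Bool.false_or]
  unfold sD
  rw [List.any_map, List.any_filter]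
  apply Bool.eq_iff_iff.mpr
  simp only [List.any_eq_true]
  constructor
  · rintro ⟨x, hmem, hx⟩
    rcases List.mem_drop_iff_getElem.mp hmem with ⟨j, hjm, hget⟩
    refine ⟨(0 + ((i + j : Nat) : Int), bidding[i + j]'(by omega)), ?_, ?_⟩
    · exact (PySem.List.mem_enumerate_iff bidding 0 _).mpr ⟨i + j, by omega, rfl⟩
    · rw [Bool.and_eq_true]
      constructor
      · rw [hget]; exact hx
      · simp only [Function.comp]
        apply decide_eq_true
        push_cast
        omega
  · rintro ⟨p, hp, hcond⟩
    rcases (PySem.List.mem_enumerate_iff bidding 0 p).mp hp with ⟨k, hk, rfl⟩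
    rw [Bool.and_eq_true] at hcond
    have hle := of_decide_eq_true hcond.2
    have hik : i ≤ k := by
      simp only [zero_add] at hle
      exact_mod_cast hle
    refine ⟨bidding[k], ?_, hcond.1⟩
    apply List.mem_drop_iff_getElem.mpr
    refine ⟨k - i, by omega, ?_⟩
    have hidx : i + (k - i) = k := by omega
    simp [hidx]

-- ===== VERDICT (by name: the statement is the Claim_ definition above) =====
theorem analyze_bidding_spec : Claim_equal_analyze_bidding := by
  intro bidding dealer _
  unfold Spec_analyze_bidding
  unfold analyze_bidding analyze_bidding_alt
  by_cases hg : (bidding.length == 4 && (PySem.Set.ofList bidding).length == 1) = true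
  · rw [if_pos hg, if_pos hg]
  · rw [if_neg hg, if_neg hg]
    obtain ⟨-, h2, h3⟩ := revfold_general bidding PySem.Dict.empty none (-1)
    have h2' : (pvRevFold bidding).2.1 = sL bidding := by
      unfold pvRevFold; rw [h2]; rfl
    have h3' : (pvRevFold bidding).2.2 = (sDmax bidding).getD (-1) := by
      unfold pvRevFold; rw [h3]; norm_num
    have hfold : ((PySem.List.enumerate bidding 0).reverse.foldl pvRevStep
        (PySem.Dict.empty, none, -1)) = pvRevFold bidding := rfl
    have hcontract : (pvRevFold bidding).2.1.getD "passout" = pvRevFind2 bidding.reverse := by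
      rw [h2', revFind2_eq]; rfl
    have hclen : (pvRevFind2 bidding.reverse).length = 2 ∨
        pvRevFind2 bidding.reverse = "passout" := by
      rw [revFind2_eq]
      cases hf : bidding.reverse.find? (fun x => x.length == 2) with
      | none => right; rfl
      | some y =>
        left
        have := List.find?_some hf
        simpa using this
    have htr : ∃ t, PySem.Str.pyGet? (pvRevFind2 bidding.reverse) 1 = some t := by
      have hcast : PySem.Str.pyGet? (pvRevFind2 bidding.reverse) 1 =
          (pvRevFind2 bidding.reverse).toList[(1 : Nat)]? := by
        exact_mod_cast PySem.Str.pyGet?_natCast (pvRevFind2 bidding.reverse) 1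
      rcases hclen with h | h
      · have hlist : 1 < (pvRevFind2 bidding.reverse).toList.length := by
          have : (pvRevFind2 bidding.reverse).toList.length =
              (pvRevFind2 bidding.reverse).length := String.length_toList ..
          omega
        rw [hcast, List.getElem?_eq_getElem hlist]
        exact ⟨_, rfl⟩
      · rw [h]
        exact ⟨'a', rfl⟩
    obtain ⟨trumps, htr⟩ := htr
    rw [hfold]
    dsimp only
    rw [hcontract, htr]
    rw [get?_revfold]
    unfold sFirst
    cases hidx : PySem.List.index? bidding (pvRevFind2 bidding.reverse) with
    | none => rfl
    | some i =>
      simp only [Option.pure_def, Option.bind_eq_bind, Option.bind_some, Option.map_some]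
      rw [decl_bridge bidding dealer trumps (i % 2)]
      have hm2 : PySem.Int.mod ((i : Nat) : Int) 2 = (((i % 2 : Nat)) : Int) := by
        exact_mod_cast PySem.Int.mod_natCast i 2
      rw [doubled_eq bidding i]
      rw [any_sD_eq bidding ((i : Nat) : Int) (by positivity), ← h3']
      rw [pick_eq_find]
      have hhead := cands_min_bridge bidding trumps (PySem.Int.mod ((i : Nat) : Int) 2)
      rw [hm2] at hhead
      rw [List.head?_filter] at hhead
      simp only [hm2]
      rw [hhead]
      cases hfd : (sF2 bidding).find? (fun p =>
          decide (PySem.Str.pyGet? p.2 1 = some trumps) &&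
            decide (PySem.Int.mod p.1 2 = ((i % 2 : Nat) : Int))) <;> rfl
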